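-- pv_equiv track=rewrite | github.com/MicheleVerriello/LabelAnything | label_anything/logger/image_logger.py | __get_class_ids
-- ===== SOURCE A (Python) =====
-- def __get_class_ids(classes):
--     res_classes = []
--     for c in classes:
--         max_len = 0
--         max_idx = 0
--         for i, x in enumerate(c):
--             max_len = max(max_len, len(x))
--             if len(x) == max_len:
--                 max_idx = i
--         res_classes.append(list(c[max_idx]))
--     return res_classes
-- ===== SOURCE B (Python) =====
-- def __get_class_ids(classes):
--     res = []
--     for c in classes:
--         best = sorted(range(len(c)), key=lambda i: len(c[i]))[-1]
--         res.append(list(c[best]))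
--     return res
-- ===== Notes on version B (the rewrite author's own statement) =====
-- stated objective: alternative
-- what changed: Replaces the running-maximum scan with separate max_len/max_idx state by a stable sort of the index range by element length, taking the last (highest-indexed longest) index.
import Mathlib
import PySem

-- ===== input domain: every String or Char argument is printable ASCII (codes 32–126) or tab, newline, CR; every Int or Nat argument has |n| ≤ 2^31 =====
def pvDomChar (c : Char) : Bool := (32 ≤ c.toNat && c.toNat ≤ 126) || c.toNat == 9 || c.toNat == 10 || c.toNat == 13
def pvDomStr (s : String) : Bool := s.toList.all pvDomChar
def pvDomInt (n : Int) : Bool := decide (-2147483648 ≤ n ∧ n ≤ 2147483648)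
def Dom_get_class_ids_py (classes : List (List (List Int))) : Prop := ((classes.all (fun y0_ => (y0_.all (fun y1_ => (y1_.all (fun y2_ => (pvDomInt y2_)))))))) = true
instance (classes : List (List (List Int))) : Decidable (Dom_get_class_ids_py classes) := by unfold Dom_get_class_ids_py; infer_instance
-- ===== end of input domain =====

-- B replaces A's running-maximum scan (max_len/max_idx state) by a stable sort of the
-- index range by element length, picking the last (= highest-indexed longest) index.

-- ===== PORT A =====
-- inner loop state (max_len, max_idx); c[max_idx] raises only for empty c (excluded by Pre_), pyGetD default unreachable there
def get_class_ids_py (classes : List (List (List Int))) : List (List Int) :=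
  classes.foldl
    (fun res c =>
      let st := (PySem.List.enumerate c 0).foldl
        (fun (s : Int × Int) (p : Int × List Int) =>
          let max_len := max s.1 (p.2.length : Int)
          (max_len, if (p.2.length : Int) = max_len then p.1 else s.2))
        (0, 0)
      res ++ [PySem.List.pyGetD c st.2 []])
    []

-- ===== PORT B =====
-- key i = len(c[i]); i comes from range(len(c)) so the pyGetD default is unreachable
def keyB_get_class_ids (c : List (List Int)) (i : Int) : Int :=
  ((PySem.List.pyGetD c i []).length : Int)

-- sorted(range(len(c)), key=...)[-1] raises IndexError only for empty c (excluded by Pre_)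
def get_class_ids_py_alt (classes : List (List (List Int))) : List (List Int) :=
  classes.map (fun c =>
    let best := PySem.List.pyGetD
      (PySem.List.sorted (PySem.List.pyRange 0 (c.length : Int) 1) (keyB_get_class_ids c)) (-1) 0
    PySem.List.pyGetD c best [])

-- ===== PRECONDITION & SPEC =====
-- Both A and B raise IndexError on any empty inner class list (A via c[max_idx], B via sorted([])[-1]); Pre_ excludes exactly those inputs.
def Pre_get_class_ids_py (classes : List (List (List Int))) : Prop :=
  ∀ c ∈ classes, c ≠ []
instance (classes : List (List (List Int))) : Decidable (Pre_get_class_ids_py classes) := by unfold Pre_get_class_ids_py; infer_instance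

def pvWitness_get_class_ids_py : List (List (List Int)) := [[[1], [2, 3], [4, 5]], [[], [7]]]

def Spec_get_class_ids_py (classes : List (List (List Int))) (out : List (List Int)) : Prop := out = get_class_ids_py_alt classes
instance (classes : List (List (List Int))) (out : List (List Int)) : Decidable (Spec_get_class_ids_py classes out) := by unfold Spec_get_class_ids_py; infer_instance

-- ===== CLAIM (what is proved, stated in full; the proofs are below) =====
def Claim_equal_get_class_ids_py : Prop := ∀ (classes : List (List (List Int))), Dom_get_class_ids_py classes → Pre_get_class_ids_py classes → Spec_get_class_ids_py classes (get_class_ids_py classes)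

-- ===== LEMMAS AND PROOFS =====

-- step of B's "last maximum", recovered from the tail of the stable sort
def lastMaxStep {α : Type} (key : α → Int) (acc : Option α) (x : α) : Option α :=
  match acc with
  | none => some x
  | some m => if key m ≤ key x then some x else some m

-- A's inner loop body, named for the proofs
def astep_get_class_ids (s : Int × Int) (p : Int × List Int) : Int × Int :=
  let max_len := max s.1 (p.2.length : Int)
  (max_len, if (p.2.length : Int) = max_len then p.1 else s.2)

theorem getLast?_insertBy {α : Type} (key : α → Int) (x : α) (acc : List α)
    (h : acc.Pairwise (fun a b => key a ≤ key b)) :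
    (PySem.List.insertBy (fun a b => decide (key a < key b)) x acc).getLast? =
      lastMaxStep key acc.getLast? x := by
  induction acc with
  | nil => simp [PySem.List.insertBy, lastMaxStep]
  | cons y ys ih =>
    rcases List.pairwise_cons.mp h with ⟨hy, hys⟩
    simp only [PySem.List.insertBy]
    split
    · -- key x < key y : x goes in front, the last element is unchanged
      rename_i hlt
      have hxy : key x < key y := of_decide_eq_true hlt
      rw [List.getLast?_cons_cons]
      cases hys' : ys.getLast? with
      | none =>
        have hnil : ys = [] := List.getLast?_eq_none_iff.mp hys'
        subst hnil
        simp [lastMaxStep, not_le.mpr hxy]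
      | some m =>
        have hym : key y ≤ key m := hy m (List.mem_of_getLast? hys')
        have hnle : ¬ key m ≤ key x := by omega
        simp [lastMaxStep, List.getLast?_cons, hys', hnle]
    · -- key y ≤ key x : x is inserted somewhere in the tail
      rename_i hge
      have hyx : key y ≤ key x := le_of_not_gt (fun hh => hge (decide_eq_true hh))
      rw [List.getLast?_cons, ih hys]
      cases hys' : ys.getLast? with
      | none =>
        have hnil : ys = [] := List.getLast?_eq_none_iff.mp hys'
        subst hnil
        simp [lastMaxStep, hyx]
      | some m =>
        simp only [lastMaxStep, List.getLast?_cons, hys']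
        split <;> simp <;> omega

-- the last element of Python's stable sort is the last maximum of the key
theorem getLast?_sorted {α : Type} (key : α → Int) (xs : List α) :
    (PySem.List.sorted xs key).getLast? = xs.foldl (lastMaxStep key) none := by
  induction xs using List.reverseRecOn with
  | nil => simp [PySem.List.sorted_eq_foldl_insertBy]
  | append_singleton xs x ih =>
    have h1 : PySem.List.sorted (xs ++ [x]) key =
        PySem.List.insertBy (fun a b => decide (key a < key b)) x (PySem.List.sorted xs key) := by
      rw [PySem.List.sorted_eq_foldl_insertBy, PySem.List.sorted_eq_foldl_insertBy,
        List.foldl_append]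
      simp
    rw [h1, getLast?_insertBy key x _ (PySem.List.sorted_pairwise xs key), ih,
      List.foldl_append]
    simp

-- every entry of enumerate c is a genuine index/value pair of c
theorem enumerate_pyGetD (c : List (List Int)) :
    ∀ pre : List (List Int), ∀ p ∈ PySem.List.enumerate c (pre.length : Int),
      PySem.List.pyGetD (pre ++ c) p.1 [] = p.2 := by
  induction c with
  | nil => intro pre p hp; simp [PySem.List.enumerate_nil] at hp
  | cons x xs ih =>
    intro pre p hp
    rw [PySem.List.enumerate_cons] at hp
    rcases List.mem_cons.mp hp with hp | hp
    · subst hp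
      simp [PySem.List.pyGetD]
    · have hcast : (pre.length : Int) + 1 = ((pre ++ [x]).length : Int) := by
        simp
      rw [hcast] at hp
      have := ih (pre ++ [x]) p hp
      simpa using this

theorem key_enumerate (c : List (List Int)) :
    ∀ p ∈ PySem.List.enumerate c 0, keyB_get_class_ids c p.1 = (p.2.length : Int) := by
  intro p hp
  have h0 : ((0 : Int)) = (([] : List (List Int)).length : Int) := by simp
  rw [h0] at hp
  have := enumerate_pyGetD c [] p hp
  simp only [List.nil_append] at this
  simp [keyB_get_class_ids, this]

-- the A inner loop and B's lastMax fold walk the same enumerate list in lock-step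
theorem fold_rel (c : List (List Int)) (ws : List (Int × List Int))
    (hws : ∀ p ∈ ws, keyB_get_class_ids c p.1 = (p.2.length : Int)) :
    ∀ ml mi, keyB_get_class_ids c mi = ml →
      ws.foldl (fun acc p => lastMaxStep (keyB_get_class_ids c) acc p.1) (some mi) =
        some (ws.foldl astep_get_class_ids (ml, mi)).2 ∧
      keyB_get_class_ids c (ws.foldl astep_get_class_ids (ml, mi)).2 =
        (ws.foldl astep_get_class_ids (ml, mi)).1 := by
  induction ws with
  | nil => intro ml mi h; simpa using h
  | cons p t ih =>
    intro ml mi h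
    have hp := hws p (List.mem_cons_self ..)
    have ht : ∀ q ∈ t, keyB_get_class_ids c q.1 = (q.2.length : Int) :=
      fun q hq => hws q (List.mem_cons_of_mem _ hq)
    by_cases hle : ml ≤ (p.2.length : Int)
    · have hstep : astep_get_class_ids (ml, mi) p = ((p.2.length : Int), p.1) := by
        simp [astep_get_class_ids, max_eq_right hle]
      have hbstep : lastMaxStep (keyB_get_class_ids c) (some mi) p.1 = some p.1 := by
        simp [lastMaxStep, h, hp, hle]
      simp only [List.foldl_cons, hstep, hbstep]
      exact ih ht _ _ hp
    · have hmax : max ml (p.2.length : Int) = ml := by omega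
      have hne : ¬ ((p.2.length : Int) = ml) := by omega
      have hstep : astep_get_class_ids (ml, mi) p = (ml, mi) := by
        simp [astep_get_class_ids, hmax, hne]
      have hbstep : lastMaxStep (keyB_get_class_ids c) (some mi) p.1 = some mi := by
        simp only [lastMaxStep, h, hp]
        rw [if_neg (by omega)]
      simp only [List.foldl_cons, hstep, hbstep]
      exact ih ht _ _ h

-- per-class agreement: A's running-maximum index is the tail of B's stable sort
theorem elem_eq (c : List (List Int)) (hc : c ≠ []) :
    PySem.List.pyGetD c
      ((PySem.List.enumerate c 0).foldl astep_get_class_ids (0, 0)).2 [] =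
    PySem.List.pyGetD c
      (PySem.List.pyGetD
        (PySem.List.sorted (PySem.List.pyRange 0 (c.length : Int) 1) (keyB_get_class_ids c))
        (-1) 0) [] := by
  obtain ⟨x, xs, rfl⟩ := List.exists_cons_of_ne_nil hc
  -- B's sort is over the index range = map fst of enumerate
  have hrange : PySem.List.pyRange 0 ((x :: xs).length : Int) 1 =
      (PySem.List.enumerate (x :: xs) 0).map (fun q => q.1) := by
    rw [PySem.List.map_fst_enumerate]
    simp
  have hsne : PySem.List.sorted (PySem.List.pyRange 0 ((x :: xs).length : Int) 1)
      (keyB_get_class_ids (x :: xs)) ≠ [] := by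
    rw [Ne, PySem.List.sorted_eq_nil_iff, hrange]
    simp [PySem.List.enumerate_cons]
  rw [PySem.List.pyGetD_neg_one _ _ hsne]
  -- identify the last element of the sort with A's loop result
  have hlast : (PySem.List.sorted (PySem.List.pyRange 0 ((x :: xs).length : Int) 1)
      (keyB_get_class_ids (x :: xs))).getLast? =
      some (((PySem.List.enumerate (x :: xs) 0).foldl astep_get_class_ids (0, 0)).2) := by
    rw [getLast?_sorted, hrange, List.foldl_map]
    -- peel off the first enumerate entry (index 0)
    rw [PySem.List.enumerate_cons, List.foldl_cons, List.foldl_cons]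
    have hk0 : keyB_get_class_ids (x :: xs) 0 = (x.length : Int) := by
      simp [keyB_get_class_ids, PySem.List.pyGetD_zero_cons]
    have hb0 : lastMaxStep (keyB_get_class_ids (x :: xs)) none 0 = some 0 := rfl
    have ha0 : astep_get_class_ids (0, 0) ((0 : Int), x) = ((x.length : Int), 0) := by
      simp [astep_get_class_ids]
    rw [hb0, ha0]
    have hws : ∀ q ∈ PySem.List.enumerate xs 1,
        keyB_get_class_ids (x :: xs) q.1 = (q.2.length : Int) := by
      intro q hq
      exact key_enumerate (x :: xs) q (by rw [PySem.List.enumerate_cons]; exact List.mem_cons_of_mem _ hq)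
    exact (fold_rel (x :: xs) (PySem.List.enumerate xs 1) hws (x.length : Int) 0 hk0).1
  have := List.getLast?_eq_some_getLast (l := PySem.List.sorted
      (PySem.List.pyRange 0 ((x :: xs).length : Int) 1) (keyB_get_class_ids (x :: xs))) hsne
  rw [this] at hlast
  exact congrArg (fun i => PySem.List.pyGetD (x :: xs) i []) (Option.some.inj hlast).symm

-- ===== VERDICT (by name: the statement is the Claim_ definition above) =====
theorem get_class_ids_py_spec : Claim_equal_get_class_ids_py := by
  intro classes _ hpre
  unfold Spec_get_class_ids_py get_class_ids_py get_class_ids_py_alt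
  rw [PySem.List.foldl_append_singleton_eq_map
    (fun c => PySem.List.pyGetD c
      ((PySem.List.enumerate c 0).foldl
        (fun (s : Int × Int) (p : Int × List Int) =>
          let max_len := max s.1 (p.2.length : Int)
          (max_len, if (p.2.length : Int) = max_len then p.1 else s.2)) (0, 0)).2 [])
    classes []]
  simp only [List.nil_append]
  refine List.map_congr_left ?_
  intro c hc
  have hfun : (fun (s : Int × Int) (p : Int × List Int) =>
      let max_len := max s.1 (p.2.length : Int)
      (max_len, if (p.2.length : Int) = max_len then p.1 else s.2)) = astep_get_class_ids := rfl
  rw [hfun]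
  exact elem_eq c (hpre c hc)
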